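-- pv_equiv track=rewrite | github.com/Jungsu-lilly/coding_test_study | 프로그래머스/lv1/최원준/대충 만든 자판.py | solution
-- ===== SOURCE A (Python) =====
-- def solution(keymap, targets):
--     def count_press(word):
--         press = 0
--         for c in word:
--             if c not in presses:
--                 return -1
--             press += presses[c]
--         return press
--
--     presses = {}
--     for button in keymap:
--         for i, c in enumerate(button):
--             presses[c] = min(presses[c], i+1) if c in presses else i+1
--     return [count_press(target) for target in targets]
-- ===== SOURCE B (Python) =====
-- def solution(keymap, targets):
--     def best(c):
--         b = None
--         for button in keymap:
--             for i, ch in enumerate(button):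
--                 if ch == c:
--                     b = i + 1 if b is None else min(b, i + 1)
--         return b
--
--     results = []
--     for target in targets:
--         total = 0
--         for c in target:
--             v = best(c)
--             if v is None:
--                 total = -1
--                 break
--             total += v
--         results.append(total)
--     return results
-- ===== Notes on version B (the rewrite author's own statement) =====
-- stated objective: alternative
-- what changed: Removed the precomputed press-count dictionary: B scans the whole keymap per target character, taking the minimum (position+1) over all occurrences directly, so no dict is built or looked up.
import Mathlib
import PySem

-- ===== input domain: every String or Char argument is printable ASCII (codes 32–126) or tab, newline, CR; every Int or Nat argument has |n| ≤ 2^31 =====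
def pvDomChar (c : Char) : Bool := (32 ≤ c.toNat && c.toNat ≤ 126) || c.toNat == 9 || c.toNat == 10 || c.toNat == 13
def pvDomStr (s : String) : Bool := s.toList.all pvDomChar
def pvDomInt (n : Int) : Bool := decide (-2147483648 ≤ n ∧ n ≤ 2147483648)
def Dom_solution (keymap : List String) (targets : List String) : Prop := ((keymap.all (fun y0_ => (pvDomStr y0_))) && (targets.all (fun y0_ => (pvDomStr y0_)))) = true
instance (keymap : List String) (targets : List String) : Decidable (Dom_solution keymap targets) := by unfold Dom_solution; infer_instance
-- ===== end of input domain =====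

-- B drops A's precomputed dict and scans the whole keymap per target character (alternative decomposition, not faster).

-- ===== PORT A =====
-- presses[c] = min(presses[c], i+1) if c in presses else i+1
def stepA (d : PySem.Dict Char Int) (p : Int × Char) : PySem.Dict Char Int :=
  d.insert p.2 (match d.get? p.2 with | some v => min v (p.1 + 1) | none => p.1 + 1)

-- count_press(word): early return -1 on a missing char, else accumulate
def countPressA (d : PySem.Dict Char Int) : List Char → Int → Int
  | [], press => press
  | c :: rest, press =>
      match d.get? c with
      | none => -1
      | some v => countPressA d rest (press + v)

def solution (keymap : List String) (targets : List String) : List Int :=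
  let presses :=
    keymap.foldl (fun d button => (PySem.List.enumerate button.toList).foldl stepA d)
      PySem.Dict.empty
  targets.map (fun target => countPressA presses target.toList 0)

-- ===== PORT B =====
-- b = i + 1 if b is None else min(b, i + 1)   (only when ch == c)
def stepB (c : Char) (b : Option Int) (p : Int × Char) : Option Int :=
  if p.2 == c then some (match b with | none => p.1 + 1 | some v => min v (p.1 + 1)) else b

-- best(c): minimum press count of c over the whole keymap, None if absent
def bestB (keymap : List String) (c : Char) : Option Int :=
  keymap.foldl (fun b button => (PySem.List.enumerate button.toList).foldl (stepB c) b) none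

def countB (keymap : List String) : List Char → Int → Int
  | [], total => total
  | c :: rest, total =>
      match bestB keymap c with
      | none => -1
      | some v => countB keymap rest (total + v)

def solution_alt (keymap : List String) (targets : List String) : List Int :=
  targets.map (fun target => countB keymap target.toList 0)

-- ===== PRECONDITION & SPEC =====
def Spec_solution (keymap : List String) (targets : List String) (out : List Int) : Prop := out = solution_alt keymap targets
instance (keymap : List String) (targets : List String) (out : List Int) : Decidable (Spec_solution keymap targets out) := by unfold Spec_solution; infer_instance

-- ===== CLAIM (what is proved, stated in full; the proofs are below) =====
def Claim_equal_solution : Prop := ∀ (keymap : List String) (targets : List String), Dom_solution keymap targets → Spec_solution keymap targets (solution keymap targets)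

-- ===== LEMMAS AND PROOFS =====

-- tracking dictionary entry c through one button's enumerate loop
theorem foldl_stepA_get? (pairs : List (Int × Char)) (d : PySem.Dict Char Int)
    (b : Option Int) (c : Char) (h : d.get? c = b) :
    (pairs.foldl stepA d).get? c = pairs.foldl (stepB c) b := by
  induction pairs generalizing d b with
  | nil => simpa using h
  | cons p rest ih =>
      simp only [List.foldl_cons]
      apply ih
      simp only [stepA, stepB, PySem.Dict.get?_insert]
      by_cases hc : p.2 = c
      · subst hc; cases b <;> simp [h]
      · simp [hc, Ne.symm hc, h]

-- tracking dictionary entry c through the whole keymap loop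
theorem foldl_keymap_get? (keymap : List String) (d : PySem.Dict Char Int)
    (b : Option Int) (c : Char) (h : d.get? c = b) :
    (keymap.foldl (fun d button => (PySem.List.enumerate button.toList).foldl stepA d) d).get? c
      = keymap.foldl (fun b button => (PySem.List.enumerate button.toList).foldl (stepB c) b) b := by
  induction keymap generalizing d b with
  | nil => simpa using h
  | cons s rest ih =>
      simp only [List.foldl_cons]
      exact ih _ _ (foldl_stepA_get? _ _ _ _ h)

theorem presses_get?_eq_bestB (keymap : List String) (c : Char) :
    (keymap.foldl (fun d button => (PySem.List.enumerate button.toList).foldl stepA d)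
      PySem.Dict.empty).get? c = bestB keymap c :=
  foldl_keymap_get? keymap PySem.Dict.empty none c (by simp)

theorem countPressA_eq_countB (keymap : List String) (l : List Char) (acc : Int) :
    countPressA
      (keymap.foldl (fun d button => (PySem.List.enumerate button.toList).foldl stepA d)
        PySem.Dict.empty) l acc = countB keymap l acc := by
  induction l generalizing acc with
  | nil => rfl
  | cons c rest ih =>
      simp only [countPressA, countB, presses_get?_eq_bestB]
      cases bestB keymap c with
      | none => rfl
      | some v => exact ih _

-- ===== VERDICT (by name: the statement is the Claim_ definition above) =====
theorem solution_spec : Claim_equal_solution := by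
  intro keymap targets _
  unfold Spec_solution solution solution_alt
  exact List.map_congr_left (fun t _ => countPressA_eq_countB keymap t.toList 0)
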